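-- pv_equiv track=rewrite | github.com/Ab2021/infra | agents/validation_security_agent.py | _validate_business_logic
-- ===== SOURCE A (Python) =====
-- from typing import Dict, List, Optional, Any
--
-- def _validate_business_logic(sql: str, context: Dict) -> Dict[str, Any]:
--     """Validates business logic and query intent alignment."""
--
--     recommendations = []
--
--     intent = context.get("query_intent", {})
--     primary_action = intent.get("primary_action", "")
--
--     # Check alignment between intent and SQL
--     sql_upper = sql.upper()
--
--     if primary_action == "aggregate":
--         if not any(agg in sql_upper for agg in ["SUM", "COUNT", "AVG", "MAX", "MIN"]):
--             recommendations.append("Query intent suggests aggregation but no aggregate functions found")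
--
--     if primary_action == "filter":
--         if "WHERE" not in sql_upper:
--             recommendations.append("Query intent suggests filtering but no WHERE clause found")
--
--     if primary_action == "sort":
--         if "ORDER BY" not in sql_upper:
--             recommendations.append("Query intent suggests sorting but no ORDER BY clause found")
--
--     # Check for temporal queries
--     temporal_scope = intent.get("temporal_scope")
--     if temporal_scope and not any(date_func in sql_upper for date_func in ["DATE", "YEAR", "MONTH", "DAY"]):
--         recommendations.append("Query has temporal scope but no date functions found")
--
--     return {"business_logic_recommendations": recommendations}
-- ===== SOURCE B (Python) =====
-- _MSG = {
--     "aggregate": "Query intent suggests aggregation but no aggregate functions found",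
--     "filter": "Query intent suggests filtering but no WHERE clause found",
--     "sort": "Query intent suggests sorting but no ORDER BY clause found",
--     "temporal": "Query has temporal scope but no date functions found",
-- }
--
-- def _capabilities(sql: str) -> set:
--     """Analyse the SQL alone: which capabilities does it exhibit?"""
--     u = sql.upper()
--     caps = set()
--     if any(k in u for k in ("SUM", "COUNT", "AVG", "MAX", "MIN")):
--         caps.add("aggregate")
--     if "WHERE" in u:
--         caps.add("filter")
--     if "ORDER BY" in u:
--         caps.add("sort")
--     if any(k in u for k in ("DATE", "YEAR", "MONTH", "DAY")):
--         caps.add("temporal")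
--     return caps
--
-- def _requirements(context: dict) -> list:
--     """Analyse the intent alone: which capabilities does it require (in order)?"""
--     intent = context.get("query_intent", {})
--     action = intent.get("primary_action", "")
--     needs = [action] if action in ("aggregate", "filter", "sort") else []
--     if intent.get("temporal_scope"):
--         needs.append("temporal")
--     return needs
--
-- def _validate_business_logic(sql: str, context: dict) -> dict:
--     caps = _capabilities(sql)
--     recs = [_MSG[n] for n in _requirements(context) if n not in caps]
--     return {"business_logic_recommendations": recs}
-- ===== Notes on version B (the rewrite author's own statement) =====
-- stated objective: alternative
-- what changed: B analyses the SQL and the intent independently: it computes the set of capabilities the SQL exhibits (aggregate/filter/sort/temporal) and the ordered list of capabilities the intent requires, and recommendations are the messages for the set difference (required minus exhibited), instead of A's intent-driven if-chain of keyword checks.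
import Mathlib
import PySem

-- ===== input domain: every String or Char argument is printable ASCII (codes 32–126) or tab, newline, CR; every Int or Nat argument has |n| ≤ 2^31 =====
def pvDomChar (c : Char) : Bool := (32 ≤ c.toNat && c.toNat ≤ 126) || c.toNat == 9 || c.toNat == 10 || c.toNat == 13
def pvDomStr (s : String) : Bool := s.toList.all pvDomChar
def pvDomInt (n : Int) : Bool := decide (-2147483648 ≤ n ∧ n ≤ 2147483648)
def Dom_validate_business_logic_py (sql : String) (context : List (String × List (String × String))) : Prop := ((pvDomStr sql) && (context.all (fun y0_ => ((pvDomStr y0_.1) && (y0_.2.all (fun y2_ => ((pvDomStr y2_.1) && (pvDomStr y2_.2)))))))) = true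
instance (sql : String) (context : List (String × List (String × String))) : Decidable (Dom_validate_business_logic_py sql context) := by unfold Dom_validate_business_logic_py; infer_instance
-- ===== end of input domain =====

-- B analyses SQL and intent independently (capability set vs requirement list, set difference) instead of A's if-chain (alternative decomposition, same cost).


-- ===== PORT A =====
def validate_business_logic_py (sql : String) (context : List (String × List (String × String))) : List (String × List String) :=
  let recommendations : List String := []
  let intent : List (String × String) := ((PySem.Dict.mk context).get? "query_intent").getD []
  let primary_action : String := ((PySem.Dict.mk intent).get? "primary_action").getD ""
  let sql_upper : String := PySem.Str.upper sql
  let recommendations :=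
    if primary_action == "aggregate" then
      if !(["SUM", "COUNT", "AVG", "MAX", "MIN"].any (fun agg => PySem.Str.isIn agg sql_upper)) then
        recommendations ++ ["Query intent suggests aggregation but no aggregate functions found"]
      else recommendations
    else recommendations
  let recommendations :=
    if primary_action == "filter" then
      if !(PySem.Str.isIn "WHERE" sql_upper) then
        recommendations ++ ["Query intent suggests filtering but no WHERE clause found"]
      else recommendations
    else recommendations
  let recommendations :=
    if primary_action == "sort" then
      if !(PySem.Str.isIn "ORDER BY" sql_upper) then
        recommendations ++ ["Query intent suggests sorting but no ORDER BY clause found"]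
      else recommendations
    else recommendations
  let temporal_scope : Option String := (PySem.Dict.mk intent).get? "temporal_scope"
  -- 'if temporal_scope and ...': truthy = present and non-empty string
  let recommendations :=
    if (match temporal_scope with | some ts => ts != "" | none => false)
        && !(["DATE", "YEAR", "MONTH", "DAY"].any (fun d => PySem.Str.isIn d sql_upper)) then
      recommendations ++ ["Query has temporal scope but no date functions found"]
    else recommendations
  [("business_logic_recommendations", recommendations)]

-- ===== PORT B ===== (capability set of the SQL vs requirement list of the intent; recs = required minus exhibited)
def pvMsgs : List (String × String) :=
  [("aggregate", "Query intent suggests aggregation but no aggregate functions found"),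
   ("filter", "Query intent suggests filtering but no WHERE clause found"),
   ("sort", "Query intent suggests sorting but no ORDER BY clause found"),
   ("temporal", "Query has temporal scope but no date functions found")]

-- which capabilities the SQL alone exhibits
def pvCapabilities (sql : String) : PySem.Set String :=
  let u := PySem.Str.upper sql
  let caps : PySem.Set String := PySem.Set.empty
  let caps := if ["SUM", "COUNT", "AVG", "MAX", "MIN"].any (fun k => PySem.Str.isIn k u) then PySem.Set.add caps "aggregate" else caps
  let caps := if PySem.Str.isIn "WHERE" u then PySem.Set.add caps "filter" else caps
  let caps := if PySem.Str.isIn "ORDER BY" u then PySem.Set.add caps "sort" else caps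
  let caps := if ["DATE", "YEAR", "MONTH", "DAY"].any (fun k => PySem.Str.isIn k u) then PySem.Set.add caps "temporal" else caps
  caps

-- which capabilities the intent alone requires, in order
def pvRequirements (context : List (String × List (String × String))) : List String :=
  let intent : List (String × String) := ((PySem.Dict.mk context).get? "query_intent").getD []
  let action : String := ((PySem.Dict.mk intent).get? "primary_action").getD ""
  let needs : List String := if ["aggregate", "filter", "sort"].contains action then [action] else []
  let needs := needs ++
    (if (match (PySem.Dict.mk intent).get? "temporal_scope" with | some ts => ts != "" | none => false)
     then ["temporal"] else [])
  needs

def validate_business_logic_py_alt (sql : String) (context : List (String × List (String × String))) : List (String × List String) :=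
  let caps := pvCapabilities sql
  let recs : List String :=
    ((pvRequirements context).filter (fun n => !(PySem.Set.contains caps n))).map
      (fun n => (PySem.Dict.mk pvMsgs).getD n "")
  [("business_logic_recommendations", recs)]

-- ===== PRECONDITION & SPEC =====
def Spec_validate_business_logic_py (sql : String) (context : List (String × List (String × String))) (out : List (String × List String)) : Prop := out = validate_business_logic_py_alt sql context
instance (sql : String) (context : List (String × List (String × String))) (out : List (String × List String)) : Decidable (Spec_validate_business_logic_py sql context out) := by unfold Spec_validate_business_logic_py; infer_instance

-- ===== CLAIM =====
def Claim_equal_validate_business_logic_py : Prop := ∀ (sql : String) (context : List (String × List (String × String))), Dom_validate_business_logic_py sql context → Spec_validate_business_logic_py sql context (validate_business_logic_py sql context)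

-- ===== LEMMAS AND PROOFS =====

-- ===== VERDICT =====
theorem validate_business_logic_py_spec : Claim_equal_validate_business_logic_py := by
  intro sql context _
  unfold Spec_validate_business_logic_py
  simp only [validate_business_logic_py, validate_business_logic_py_alt, pvCapabilities,
    pvRequirements, pvMsgs]
  generalize ((PySem.Dict.mk (((PySem.Dict.mk context).get? "query_intent").getD [])).get? "primary_action").getD "" = act
  generalize (PySem.Dict.mk (((PySem.Dict.mk context).get? "query_intent").getD [])).get? "temporal_scope" = ts
  generalize PySem.Str.upper sql = up
  generalize (["SUM", "COUNT", "AVG", "MAX", "MIN"].any (fun k => PySem.Str.isIn k up)) = bA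
  generalize (PySem.Str.isIn "WHERE" up) = bW
  generalize (PySem.Str.isIn "ORDER BY" up) = bO
  generalize (["DATE", "YEAR", "MONTH", "DAY"].any (fun k => PySem.Str.isIn k up)) = bD
  generalize (match ts with | some ts => ts != "" | none => false) = t
  cases bA <;> cases bW <;> cases bO <;> cases bD <;> cases t <;>
    by_cases h1 : act = "aggregate" <;> by_cases h2 : act = "filter" <;> by_cases h3 : act = "sort" <;>
    subst_vars <;>
    simp_all [PySem.Set.add, PySem.Set.contains, PySem.Set.empty, PySem.Dict.getD, PySem.Dict.get?]
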